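-- pv_equiv track=rewrite | github.com/ygrayne/oberon-rtk | tools/pio2o.py | extract_pio_lines
-- ===== SOURCE A (Python) =====
-- PIOBEGIN = "PIOBEGIN"
--
-- PIOEND = "PIOEND"
--
-- def extract_pio_lines(in_lines, inf_ext):
-- # pio_lines: a list of pio code lines from input file lines
--     pio_lines = []
--     if inf_ext == ".mod":
--         copy_line = False
--         begin_ok = False
--         end_ok = False
--         for in_line in in_lines:
--             line = in_line.strip()
--             if line.startswith(PIOBEGIN):
--                 copy_line = True
--                 begin_ok = True
--             elif line.startswith(PIOEND):
--                 if not begin_ok: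
--                     # no begin
--                     break
--                 copy_line = False
--                 end_ok = True
--                 # begin and end
--                 break
--             elif (begin_ok and line.endswith("*)")):
--                 # no end
--                 break
--             elif copy_line:
--                 pio_lines.append(in_line.strip("\n"))
--         if not (begin_ok and end_ok):
--             pio_lines = []
--     else: # .pio
--         for in_line in in_lines:
--             pio_lines.append(in_line.strip("\n"))
--     return pio_lines
-- ===== SOURCE B (Python) =====
-- PIOBEGIN = "PIOBEGIN"
--
-- PIOEND = "PIOEND"
--
-- def extract_pio_lines(in_lines, inf_ext):
--     # Two-phase decomposition: find the PIOBEGIN marker first, then collect until PIOEND.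
--     if inf_ext != ".mod":
--         return [l.strip("\n") for l in in_lines]
--     # phase 1: scan for the first marker line; a PIOEND seen first means no block
--     start = None
--     for i, l in enumerate(in_lines):
--         s = l.strip()
--         if s.startswith(PIOBEGIN):
--             start = i + 1
--             break
--         if s.startswith(PIOEND):
--             return []
--     if start is None:
--         return []
--     # phase 2: collect body lines until a PIOEND; a comment end or EOF means no block
--     out = []
--     for l in in_lines[start:]:
--         s = l.strip()
--         if s.startswith(PIOBEGIN):
--             continue
--         if s.startswith(PIOEND):
--             return out
--         if s.endswith("*)"):
--             return []
--         out.append(l.strip("\n"))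
--     return []
-- ===== Notes on version B (the rewrite author's own statement) =====
-- stated objective: simpler
-- what changed: Replaces A's single loop with three boolean state flags (copy_line/begin_ok/end_ok) and a post-hoc reset by a two-phase scan: first locate the PIOBEGIN marker (bailing out on an earlier PIOEND), then collect body lines until PIOEND, with early returns instead of flag bookkeeping.
import Mathlib
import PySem

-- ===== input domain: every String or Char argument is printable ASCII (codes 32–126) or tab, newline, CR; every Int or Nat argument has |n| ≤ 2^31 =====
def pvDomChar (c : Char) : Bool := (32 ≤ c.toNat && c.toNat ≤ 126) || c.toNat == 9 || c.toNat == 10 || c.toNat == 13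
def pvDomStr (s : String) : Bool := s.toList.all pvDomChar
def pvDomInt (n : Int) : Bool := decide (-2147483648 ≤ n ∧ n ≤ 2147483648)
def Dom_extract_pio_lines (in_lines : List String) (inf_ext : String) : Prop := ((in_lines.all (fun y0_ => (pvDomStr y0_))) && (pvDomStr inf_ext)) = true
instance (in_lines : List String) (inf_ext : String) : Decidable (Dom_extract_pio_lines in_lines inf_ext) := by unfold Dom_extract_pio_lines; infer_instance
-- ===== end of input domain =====

-- B replaces A's three boolean state flags by a two-phase scan (find PIOBEGIN, then collect until PIOEND); objective: simpler.

-- ===== PORT A =====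
-- the .mod loop of A: state (pio_lines, copy_line, begin_ok, end_ok); returns (pio_lines, begin_ok, end_ok)
def pvALoop : List String → List String → Bool → Bool → Bool → (List String × Bool × Bool)
  | [], acc, _, b, e => (acc, b, e)
  | l :: rest, acc, copy, b, e =>
    let line := PySem.Str.strip l
    if PySem.Str.startswith line "PIOBEGIN" then
      pvALoop rest acc true true e
    else if PySem.Str.startswith line "PIOEND" then
      if !b then (acc, b, e) else (acc, b, true)
    else if b && PySem.Str.endswith line "*)" then
      (acc, b, e)
    else if copy then
      pvALoop rest (acc ++ [PySem.Str.stripChars l "\n"]) copy b e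
    else
      pvALoop rest acc copy b e

def extract_pio_lines (in_lines : List String) (inf_ext : String) : List String :=
  if inf_ext == ".mod" then
    match pvALoop in_lines [] false false false with
    | (p, b, e) => if b && e then p else []
  else
    in_lines.map (fun l => PySem.Str.stripChars l "\n")

-- ===== PORT B =====
-- phase 1: find the first marker line; some rest = lines after the PIOBEGIN line, none = no block
def pvFindBegin : List String → Option (List String)
  | [] => none
  | l :: rest =>
    let s := PySem.Str.strip l
    if PySem.Str.startswith s "PIOBEGIN" then some rest
    else if PySem.Str.startswith s "PIOEND" then none
    else pvFindBegin rest

-- phase 2: collect body lines until a PIOEND; none on comment end or EOF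
def pvCollect : List String → List String → Option (List String)
  | [], _ => none
  | l :: rest, acc =>
    let s := PySem.Str.strip l
    if PySem.Str.startswith s "PIOBEGIN" then pvCollect rest acc
    else if PySem.Str.startswith s "PIOEND" then some acc
    else if PySem.Str.endswith s "*)" then none
    else pvCollect rest (acc ++ [PySem.Str.stripChars l "\n"])

def extract_pio_lines_alt (in_lines : List String) (inf_ext : String) : List String :=
  if inf_ext != ".mod" then
    in_lines.map (fun l => PySem.Str.stripChars l "\n")
  else
    match pvFindBegin in_lines with
    | none => []
    | some rest => (pvCollect rest []).getD []

-- ===== PRECONDITION & SPEC =====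
def Spec_extract_pio_lines (in_lines : List String) (inf_ext : String) (out : List String) : Prop := out = extract_pio_lines_alt in_lines inf_ext
instance (in_lines : List String) (inf_ext : String) (out : List String) : Decidable (Spec_extract_pio_lines in_lines inf_ext out) := by unfold Spec_extract_pio_lines; infer_instance

-- ===== CLAIM (what is proved, stated in full; the proofs are below) =====
def Claim_equal_extract_pio_lines : Prop := ∀ (in_lines : List String) (inf_ext : String), Dom_extract_pio_lines in_lines inf_ext → Spec_extract_pio_lines in_lines inf_ext (extract_pio_lines in_lines inf_ext)

-- ===== LEMMAS AND PROOFS =====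

-- inside the block (copy = begin_ok = true, end_ok = false), A's loop agrees with pvCollect
theorem pvALoop_collect (xs : List String) : ∀ acc : List String,
    (match pvALoop xs acc true true false with
     | (p, b, e) => if b && e then p else []) = (pvCollect xs acc).getD [] := by
  induction xs with
  | nil => intro acc; simp [pvALoop, pvCollect]
  | cons l rest ih =>
    intro acc
    by_cases h1 : PySem.Chars.startswith (PySem.Chars.strip l.toList) ['P','I','O','B','E','G','I','N'] = true
    · simpa [pvALoop, pvCollect, h1] using ih acc
    · by_cases h2 : PySem.Chars.startswith (PySem.Chars.strip l.toList) ['P','I','O','E','N','D'] = true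
      · simp [pvALoop, pvCollect, h1, h2]
      · by_cases h3 : PySem.Chars.endswith (PySem.Chars.strip l.toList) ['*',')'] = true
        · simp [pvALoop, pvCollect, h1, h2, h3]
        · simpa [pvALoop, pvCollect, h1, h2, h3] using ih (acc ++ [PySem.Str.stripChars l "\n"])

-- before the block, A's loop agrees with pvFindBegin followed by pvCollect
theorem pvALoop_find (xs : List String) : ∀ acc : List String,
    (match pvALoop xs acc false false false with
     | (p, b, e) => if b && e then p else []) =
    (match pvFindBegin xs with
     | none => []
     | some rest => (pvCollect rest acc).getD []) := by
  induction xs with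
  | nil => intro acc; simp [pvALoop, pvFindBegin]
  | cons l rest ih =>
    intro acc
    by_cases h1 : PySem.Chars.startswith (PySem.Chars.strip l.toList) ['P','I','O','B','E','G','I','N'] = true
    · simpa [pvALoop, pvFindBegin, h1] using pvALoop_collect rest acc
    · by_cases h2 : PySem.Chars.startswith (PySem.Chars.strip l.toList) ['P','I','O','E','N','D'] = true
      · simp [pvALoop, pvFindBegin, h1, h2]
      · simpa [pvALoop, pvFindBegin, h1, h2] using ih acc

-- ===== VERDICT (by name: the statement is the Claim_ definition above) =====
theorem extract_pio_lines_spec : Claim_equal_extract_pio_lines := by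
  intro in_lines inf_ext _
  unfold Spec_extract_pio_lines extract_pio_lines extract_pio_lines_alt
  by_cases h : inf_ext = ".mod"
  · simp only [h, beq_self_eq_true, if_true, bne_self_eq_false, Bool.false_eq_true, if_false]
    exact pvALoop_find in_lines []
  · simp [h]
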